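-- pv_equiv track=rewrite | github.com/AdamJSoftware/iti1120 | assignments/A3/a3_part2_300166171.py | waveop
-- ===== SOURCE A (Python) =====
-- def waveop(s):
--     '''
--     (String) -> String
--     Description: Returns a string with lowercase or capitalized o's and p's (depending on the capitalization of the pair of characters) in between pairs of characters
--     Preconditions: s is a string
--     '''
--     last_value = ''
--     new_s = ''
--     for i in range(len(s)):
--         if(i==0):
--             new_s = new_s + s[i]
--         else:
--             if s[i].isalpha() and last_value.isalpha():
--                 if last_value.isupper():
--                     new_s = new_s + "O"
--                 else:
--                     new_s = new_s + "o"
--                 if s[i].isupper():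
--                     new_s = new_s + "P"
--                 else:
--                     new_s = new_s + "p"
--             new_s = new_s + s[i]
--         last_value = s[i]
--
--     return new_s
-- ===== SOURCE B (Python) =====
-- def _gap(a, b):
--     if a.isalpha() and b.isalpha():
--         return ('O' if a.isupper() else 'o') + ('P' if b.isupper() else 'p')
--     return ''
--
-- def waveop(s):
--     # Divide and conquer: the o/p insertions at each gap are independent,
--     # so process the two halves recursively and join them with the gap
--     # between the boundary characters.
--     n = len(s)
--     if n <= 1:
--         return s
--     mid = n // 2
--     return waveop(s[:mid]) + _gap(s[mid - 1], s[mid]) + waveop(s[mid:])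
-- ===== Notes on version B (the rewrite author's own statement) =====
-- stated objective: alternative
-- what changed: Replaces A's single left-to-right index loop with last_value state by a divide-and-conquer recursion: split the string in half, process each half recursively, and join with the insertion for the boundary pair (correct because each inserted o/p pair depends only on its two adjacent characters).
import Mathlib
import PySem

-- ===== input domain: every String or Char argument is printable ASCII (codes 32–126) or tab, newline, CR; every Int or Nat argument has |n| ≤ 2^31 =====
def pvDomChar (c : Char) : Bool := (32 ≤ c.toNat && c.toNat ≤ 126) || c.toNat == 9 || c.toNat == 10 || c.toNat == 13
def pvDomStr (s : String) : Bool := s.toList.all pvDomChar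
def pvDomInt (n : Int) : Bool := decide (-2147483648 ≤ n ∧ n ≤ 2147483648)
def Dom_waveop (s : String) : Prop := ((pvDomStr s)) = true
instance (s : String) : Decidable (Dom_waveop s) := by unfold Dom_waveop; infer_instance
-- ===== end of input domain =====

-- B replaces A's left-to-right index loop with last_value state by a divide-and-conquer
-- recursion on string halves joined with the boundary pair's insertion (alternative).

-- ===== PORT A =====
-- Python str.isupper on a list of chars (exact on ASCII: at least one uppercase letter, no lowercase one)
def pyStrIsupper (l : List Char) : Bool :=
  l.any PySem.Chars.isupper && l.all (fun c => !PySem.Chars.islower c)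

-- one iteration of A's for-loop: state = (last_value, new_s)
def waveopStep (st : List Char × List Char) (ic : Int × Char) : List Char × List Char :=
  if ic.1 == 0 then ([ic.2], st.2 ++ [ic.2])
  else
    let acc :=
      if PySem.Chars.isalpha ic.2 && PySem.Chars.strIsalpha st.1 then
        (st.2 ++ (if pyStrIsupper st.1 then ['O'] else ['o'])) ++
          (if PySem.Chars.isupper ic.2 then ['P'] else ['p'])
      else st.2
    ([ic.2], acc ++ [ic.2])

def waveop (s : String) : String :=
  String.ofList ((PySem.List.enumerate s.toList 0).foldl waveopStep ([], [])).2

-- ===== PORT B =====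
-- B's helper _gap(a, b)
def waveopGap (a b : Char) : List Char :=
  if PySem.Chars.isalpha a && PySem.Chars.isalpha b then
    [if PySem.Chars.isupper a then 'O' else 'o',
     if PySem.Chars.isupper b then 'P' else 'p']
  else []

-- B's recursion over the characters, structurally on a fuel bounded by the length
-- (the fuel only makes the recursion structural; it never runs out since each half is
-- strictly shorter); the two indexed accesses s[mid-1], s[mid] are in range
-- (1 <= mid < length when length >= 2), so getD is exact here
def waveopGoFuel : Nat → List Char → List Char
  | _, [] => []
  | 0, l => l
  | (fuel+1), l =>
    if l.length ≤ 1 then l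
    else
      waveopGoFuel fuel (l.take (l.length / 2)) ++
        waveopGap (l.getD (l.length / 2 - 1) ' ') (l.getD (l.length / 2) ' ') ++
        waveopGoFuel fuel (l.drop (l.length / 2))

def waveop_alt (s : String) : String := String.ofList (waveopGoFuel s.toList.length s.toList)

-- ===== PRECONDITION & SPEC =====
def Spec_waveop (s : String) (out : String) : Prop := out = waveop_alt s
instance (s : String) (out : String) : Decidable (Spec_waveop s out) := by unfold Spec_waveop; infer_instance

-- ===== CLAIM (what is proved, stated in full; the proofs are below) =====
def Claim_equal_waveop : Prop := ∀ (s : String), Dom_waveop s → Spec_waveop s (waveop s)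

-- ===== LEMMAS AND PROOFS =====

-- the common reference result: tail of the output after emitting character p
def Wtail (p : Char) : List Char → List Char
  | [] => []
  | c :: t => waveopGap p c ++ c :: Wtail c t

def Wref : List Char → List Char
  | [] => []
  | c :: t => c :: Wtail c t

lemma islower_eq_false_of_isupper (c : Char) :
    PySem.Chars.isupper c = true → PySem.Chars.islower c = false := by
  have hA : 'A'.val.toNat = 65 := rfl
  have hZ : 'Z'.val.toNat = 90 := rfl
  have ha : 'a'.val.toNat = 97 := rfl
  have hz : 'z'.val.toNat = 122 := rfl
  simp only [PySem.Chars.isupper, PySem.Chars.islower, Bool.and_eq_true, decide_eq_true_eq,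
    Bool.and_eq_false_iff, decide_eq_false_iff_not, Char.le_def, UInt32.le_iff_toNat_le,
    hA, hZ, ha, hz]
  omega

lemma pyStrIsupper_single (c : Char) : pyStrIsupper [c] = PySem.Chars.isupper c := by
  by_cases h : PySem.Chars.isupper c = true
  · simp [pyStrIsupper, h, islower_eq_false_of_isupper c h]
  · simp only [Bool.not_eq_true] at h
    simp [pyStrIsupper, h]

lemma strIsalpha_single (c : Char) :
    PySem.Chars.strIsalpha [c] = PySem.Chars.isalpha c := by
  simp [PySem.Chars.strIsalpha]

lemma waveopStep_ne_zero (i : Int) (hi : i ≠ 0) (p c : Char) (acc : List Char) :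
    waveopStep ([p], acc) (i, c) = ([c], acc ++ waveopGap p c ++ [c]) := by
  simp only [waveopStep, waveopGap, beq_iff_eq, hi, if_false,
    pyStrIsupper_single, strIsalpha_single, Bool.and_comm]
  split_ifs <;> simp

lemma foldA_eq_Wtail (rest : List Char) : ∀ (i : Int) (p : Char) (acc : List Char), 1 ≤ i →
    ((PySem.List.enumerate rest i).foldl waveopStep ([p], acc)).2 = acc ++ Wtail p rest := by
  induction rest with
  | nil => intro i p acc _; simp [PySem.List.enumerate_nil, Wtail]
  | cons c rs ih =>
    intro i p acc hi
    rw [PySem.List.enumerate_cons]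
    simp only [List.foldl_cons]
    rw [waveopStep_ne_zero i (by omega) p c acc, ih (i + 1) c _ (by omega), Wtail]
    simp

lemma waveop_eq_Wref (s : String) : waveop s = String.ofList (Wref s.toList) := by
  unfold waveop
  cases hl : s.toList with
  | nil => simp [PySem.List.enumerate_nil, Wref]
  | cons c rs =>
    rw [PySem.List.enumerate_cons]
    simp only [List.foldl_cons]
    have h0 : waveopStep ([], []) ((0 : Int), c) = ([c], [c]) := by simp [waveopStep]
    rw [h0, show (0:Int)+1 = 1 from rfl, foldA_eq_Wtail rs 1 c [c] (by omega), Wref]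
    simp

lemma Wtail_append (t1 : List Char) : ∀ (p c : Char) (t2 : List Char),
    Wtail p (t1 ++ c :: t2)
      = Wtail p t1 ++ waveopGap ((p :: t1).getLast (List.cons_ne_nil _ _)) c ++ (c :: Wtail c t2) := by
  induction t1 with
  | nil => intro p c t2; simp [Wtail]
  | cons d t1 ih =>
    intro p c t2
    simp only [List.cons_append, Wtail, ih d c t2, List.getLast_cons (List.cons_ne_nil _ _)]
    simp

lemma Wref_append (l1 l2 : List Char) (h1 : l1 ≠ []) (h2 : l2 ≠ []) :
    Wref (l1 ++ l2) = Wref l1 ++ waveopGap (l1.getLast h1) (l2.head h2) ++ Wref l2 := by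
  cases l1 with
  | nil => exact absurd rfl h1
  | cons p t1 =>
    cases l2 with
    | nil => exact absurd rfl h2
    | cons c t2 =>
      simp only [List.cons_append, Wref, Wtail_append t1 p c t2, List.head_cons]

lemma waveopGoFuel_eq_Wref : ∀ (n : Nat) (l : List Char), l.length ≤ n → waveopGoFuel n l = Wref l := by
  intro n
  induction n with
  | zero =>
    intro l h
    have hl : l = [] := List.eq_nil_of_length_eq_zero (Nat.le_zero.mp h)
    subst hl; rfl
  | succ n ih =>
    intro l h
    cases l with
    | nil => rfl
    | cons c t =>
      change (if (c :: t).length ≤ 1 then c :: t else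
        waveopGoFuel n ((c :: t).take ((c :: t).length / 2)) ++
          waveopGap ((c :: t).getD ((c :: t).length / 2 - 1) ' ')
            ((c :: t).getD ((c :: t).length / 2) ' ') ++
          waveopGoFuel n ((c :: t).drop ((c :: t).length / 2))) = Wref (c :: t)
      by_cases h1 : (c :: t).length ≤ 1
      · rw [if_pos h1]
        cases t with
        | nil => simp [Wref, Wtail]
        | cons d t => simp at h1
      · rw [if_neg h1]
        rw [Nat.not_le] at h1
        generalize hm : (c :: t).length / 2 = mid
        generalize hL : c :: t = l at *
        have hlen2 : 2 ≤ l.length := h1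
        have hmid1 : 1 ≤ mid := by omega
        have hmidlt : mid < l.length := by omega
        have htake : (l.take mid).length = mid := by simp; omega
        have hdrop : (l.drop mid).length = l.length - mid := by simp
        have htne : l.take mid ≠ [] := by
          intro hc; rw [hc] at htake; simp at htake; omega
        have hdne : l.drop mid ≠ [] := by
          intro hc; rw [hc] at hdrop; simp at hdrop; omega
        rw [ih (l.take mid) (by omega), ih (l.drop mid) (by omega)]
        have hlast : (l.take mid).getLast htne = l.getD (mid - 1) ' ' := by
          rw [List.getLast_eq_getElem, List.getD_eq_getElem l ' ' (by omega)]
          simp only [htake]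
          rw [List.getElem_take]
        have hhead : (l.drop mid).head hdne = l.getD mid ' ' := by
          rw [List.head_eq_getElem, List.getD_eq_getElem l ' ' hmidlt]
          simp [List.getElem_drop]
        rw [← hlast, ← hhead, ← Wref_append (l.take mid) (l.drop mid) htne hdne, List.take_append_drop]

lemma waveop_alt_eq_Wref (s : String) : waveop_alt s = String.ofList (Wref s.toList) := by
  unfold waveop_alt
  rw [waveopGoFuel_eq_Wref s.toList.length s.toList le_rfl]

-- ===== VERDICT (by name: the statement is the Claim_ definition above) =====
theorem waveop_spec : Claim_equal_waveop := by
  intro s _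
  unfold Spec_waveop
  rw [waveop_eq_Wref, waveop_alt_eq_Wref]
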